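-- pv_equiv track=rewrite | github.com/jimmynguyen/daily-programmer | python/c004i.py | any_operator
-- ===== SOURCE A (Python) =====
-- class Operation:
-- 	ADDITION = '+'
-- 	SUBTRACTION = '-'
-- 	MULTIPLICATION = '*'
-- 	DIVISION = '/'
-- 	MODULO = '%'
-- 	EXPONENTIATION = '^'
--
-- 	@staticmethod
-- 	def values():
-- 		return [Operation.ADDITION, \
-- 				Operation.SUBTRACTION, \
-- 				Operation.MULTIPLICATION, \
-- 				Operation.DIVISION, \
-- 				Operation.MODULO, \
-- 				Operation.EXPONENTIATION]
--
-- def any_operator(expression):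
-- 	for operation in Operation.values():
-- 		if Operation.SUBTRACTION != operation and operation in expression:
-- 			return True
-- 	if Operation.SUBTRACTION in expression:
-- 		ndx = expression.index(Operation.SUBTRACTION)
-- 		if ndx == 0:
-- 			expression = expression[1:]
-- 			if Operation.SUBTRACTION in expression:
-- 				return True
-- 		else:
-- 			return True
-- 	return False
-- ===== SOURCE B (Python) =====
-- def any_operator(expression):
-- 	i = 0
-- 	for ch in expression:
-- 		if ch in '+*/%^' or (ch == '-' and i > 0):
-- 			return True
-- 		i += 1
-- 	return False
-- ===== Notes on version B (the rewrite author's own statement) =====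
-- stated objective: simpler
-- what changed: B is a single character-by-character scan with a position counter, returning True on the first operator character (counting '-' only at a position > 0), instead of A's per-operator substring-membership loop plus a separate index-based leading-minus special case.
import Mathlib
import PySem

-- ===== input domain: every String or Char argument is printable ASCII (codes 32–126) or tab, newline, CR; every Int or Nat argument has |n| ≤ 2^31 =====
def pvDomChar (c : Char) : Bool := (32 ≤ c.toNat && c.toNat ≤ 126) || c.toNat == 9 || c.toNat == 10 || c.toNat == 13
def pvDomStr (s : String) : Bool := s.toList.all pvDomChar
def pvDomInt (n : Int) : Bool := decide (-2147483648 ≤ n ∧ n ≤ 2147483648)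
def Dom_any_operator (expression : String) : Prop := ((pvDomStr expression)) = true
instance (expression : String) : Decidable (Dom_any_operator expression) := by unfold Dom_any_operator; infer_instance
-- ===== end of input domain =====

-- B is a single character-by-character scan with a position counter (a '-' counts only at position > 0),
-- replacing A's per-operator substring-membership loop plus its index-based leading-minus special case.

-- ===== PORT A =====
-- Operation.values()
def opValues : List String := ["+", "-", "*", "/", "%", "^"]

-- the 'for operation in Operation.values(): …' loop with early return
def anyOpLoop (ops : List String) (e : String) : Option Bool :=
  match ops with
  | [] => none
  | op :: rest =>
      if "-" ≠ op ∧ PySem.Str.isIn op e then some true else anyOpLoop rest e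

def any_operator (expression : String) : Bool :=
  match anyOpLoop opValues expression with
  | some b => b
  | none =>
      if PySem.Str.isIn "-" expression then
        let ndx := PySem.Str.find expression "-"   -- expression.index('-'), guarded by the 'in' test
        if ndx = 0 then
          let expression' := PySem.Str.slice expression (some 1) none  -- expression[1:]
          if PySem.Str.isIn "-" expression' then true else false
        else true
      else false

-- ===== PORT B =====
-- the 'for ch in expression: …' loop of Source B, carrying the counter i
def altLoop (i : Int) (cs : List Char) : Bool :=
  match cs with
  | [] => false
  | ch :: rest =>
      if ch ∈ ['+', '*', '/', '%', '^'] ∨ (ch = '-' ∧ i > 0) then true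
      else altLoop (i + 1) rest

def any_operator_alt (expression : String) : Bool :=
  altLoop 0 expression.toList

-- ===== PRECONDITION & SPEC =====
def Spec_any_operator (expression : String) (out : Bool) : Prop := out = any_operator_alt expression
instance (expression : String) (out : Bool) : Decidable (Spec_any_operator expression out) := by unfold Spec_any_operator; infer_instance

-- ===== CLAIM (what is proved, stated in full; the proofs are below) =====
def Claim_equal_any_operator : Prop := ∀ (expression : String), Dom_any_operator expression → Spec_any_operator expression (any_operator expression)

-- ===== LEMMAS AND PROOFS =====

theorem loop_eq (e : String) : anyOpLoop opValues e =
    (if PySem.Str.isIn "+" e ∨ PySem.Str.isIn "*" e ∨ PySem.Str.isIn "/" e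
        ∨ PySem.Str.isIn "%" e ∨ PySem.Str.isIn "^" e then some true else none) := by
  simp [anyOpLoop, opValues]; split_ifs <;> tauto

theorem singleton_infix_iff {α : Type} (c : α) (l : List α) : [c] <:+: l ↔ c ∈ l := by
  constructor
  · intro h; exact List.singleton_sublist.mp h.sublist
  · intro h; obtain ⟨s, t, rfl⟩ := List.append_of_mem h; exact ⟨s, t, by simp⟩

theorem chars_isIn_single (c : Char) (l : List Char) : PySem.Chars.isIn [c] l = l.contains c := by
  rw [Bool.eq_iff_iff]; simp [PySem.Chars.isIn_iff_infix, singleton_infix_iff]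

theorem find_eq_zero_iff (l sub : List Char) : PySem.Chars.find l sub = 0 ↔ sub <+: l := by
  constructor
  · intro h
    have h0 : (0:Int) ≤ PySem.Chars.find l sub := by omega
    simpa [h] using (PySem.Chars.find_spec h0).1
  · intro h
    have hin : sub <:+: l := h.isInfix
    have hnn : (0:Int) ≤ PySem.Chars.find l sub := (PySem.Chars.find_nonneg_iff l sub).mpr hin
    by_contra hne
    have hpos : (0:Int) < PySem.Chars.find l sub := lt_of_le_of_ne hnn (Ne.symm hne)
    exact (PySem.Chars.find_spec hnn).2 0 (by omega) h

-- for a positive counter, the scan is plain membership of any of the six operator characters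
theorem altLoop_pos (cs : List Char) (i : Int) (hi : i > 0) :
    altLoop i cs = cs.any (fun c => c ∈ ['+', '*', '/', '%', '^', '-']) := by
  induction cs generalizing i with
  | nil => simp [altLoop]
  | cons c t ih =>
      rw [altLoop, ih (i+1) (by omega)]
      by_cases hc : c = '-'
      · simp [hc, hi]
      · by_cases h5 : c ∈ ['+', '*', '/', '%', '^'] <;> simp [h5, hc] <;> aesop

theorem main_eq (e : String) : any_operator e = any_operator_alt e := by
  unfold any_operator any_operator_alt
  rw [loop_eq]
  simp [chars_isIn_single, PySem.Str.toList_slice, PySem.List.slice_from_one]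
  generalize e.toList = l
  rcases l with _ | ⟨c, t⟩
  · simp [altLoop]
  · rw [altLoop, show (0:Int)+1 = 1 from rfl, altLoop_pos t 1 (by omega)]
    by_cases hc : c = '-'
    · subst hc
      have hf : PySem.Chars.find ('-' :: t) ['-'] = 0 :=
        (find_eq_zero_iff _ _).mpr ⟨t, rfl⟩
      by_cases hP : '+' ∈ ('-'::t) ∨ '*' ∈ ('-'::t) ∨ '/' ∈ ('-'::t) ∨ '%' ∈ ('-'::t) ∨ '^' ∈ ('-'::t)
      · simp only [if_pos hP]
        simp at hP ⊢
        aesop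
      · simp only [if_neg hP]
        simp [hf] at hP ⊢
        obtain ⟨h1, h2, h3, h4, h5⟩ := hP
        rw [Bool.eq_iff_iff]
        simp only [List.any_eq_true, Bool.or_eq_true, decide_eq_true_eq]
        constructor
        · intro hm; exact ⟨'-', hm, by simp⟩
        · rintro ⟨x, hx, rfl | rfl | rfl | rfl | rfl | rfl⟩
          · exact absurd hx h1
          · exact absurd hx h2
          · exact absurd hx h3
          · exact absurd hx h4
          · exact absurd hx h5
          · exact hx
    · have hf : ¬ PySem.Chars.find (c :: t) ['-'] = 0 := by
        rw [find_eq_zero_iff]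
        rintro ⟨s, hs⟩
        injection hs with h1 _
        exact hc h1.symm
      by_cases hP : '+' ∈ (c::t) ∨ '*' ∈ (c::t) ∨ '/' ∈ (c::t) ∨ '%' ∈ (c::t) ∨ '^' ∈ (c::t)
      · simp only [if_pos hP]
        simp [hc] at hP ⊢
        aesop
      · simp only [if_neg hP]
        simp [hf, hc] at hP ⊢
        obtain ⟨⟨h1, h1t⟩, ⟨h2, h2t⟩, ⟨h3, h3t⟩, ⟨h4, h4t⟩, h5, h5t⟩ := hP
        rw [Bool.eq_iff_iff]
        simp only [List.any_eq_true, Bool.or_eq_true, decide_eq_true_eq]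
        constructor
        · rintro (h | hm)
          · exact absurd h.symm hc
          · exact Or.inr ⟨'-', hm, by simp⟩
        · rintro (⟨(rfl | rfl | rfl | rfl | rfl)⟩ | ⟨x, hx, rfl | rfl | rfl | rfl | rfl | rfl⟩)
          · exact absurd rfl h1
          · exact absurd rfl h2
          · exact absurd rfl h3
          · exact absurd rfl h4
          · exact absurd rfl h5
          · exact absurd hx h1t
          · exact absurd hx h2t
          · exact absurd hx h3t
          · exact absurd hx h4t
          · exact absurd hx h5t
          · exact Or.inr hx

-- ===== VERDICT (by name: the statement is the Claim_ definition above) =====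
theorem any_operator_spec : Claim_equal_any_operator := by
  intro e _
  exact main_eq e
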